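-- pv_equiv track=rewrite | github.com/emilyyyya/EXAMEN-1 | Ejercicio6.py | ordenar_personajes
-- ===== SOURCE A (Python) =====
-- def ordenar_personajes(lista_personajes):
--     # Listas para almacenar personajes humanos y no humanos
--     humanos = []
--     no_humanos = []
--
--     # Iterar sobre la lista de personajes
--     for personaje in lista_personajes:
--         if personaje["raza"] == "humano":
--             humanos.append(personaje["nombre"])
--         else:
--             no_humanos.append(personaje["nombre"])
--
--     # Ordenar las listas de personajes
--     humanos.sort()
--     no_humanos.sort()
--
--     return humanos, no_humanos
-- ===== SOURCE B (Python) =====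
-- def ordenar_personajes(lista_personajes):
--     # Project to (nombre, raza) pairs, sort once by name, then two filter passes.
--     pares = sorted(((p["nombre"], p["raza"]) for p in lista_personajes), key=lambda t: t[0])
--     humanos = [n for n, r in pares if r == "humano"]
--     no_humanos = [n for n, r in pares if r != "humano"]
--     return humanos, no_humanos
-- ===== Notes on version B (the rewrite author's own statement) =====
-- stated objective: alternative
-- what changed: B projects each dict to a (nombre, raza) pair, sorts that pair list once by name, and produces each result with a separate filter/comprehension pass, instead of A's single accumulator loop that appends into two lists and then sorts each list.
import Mathlib
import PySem

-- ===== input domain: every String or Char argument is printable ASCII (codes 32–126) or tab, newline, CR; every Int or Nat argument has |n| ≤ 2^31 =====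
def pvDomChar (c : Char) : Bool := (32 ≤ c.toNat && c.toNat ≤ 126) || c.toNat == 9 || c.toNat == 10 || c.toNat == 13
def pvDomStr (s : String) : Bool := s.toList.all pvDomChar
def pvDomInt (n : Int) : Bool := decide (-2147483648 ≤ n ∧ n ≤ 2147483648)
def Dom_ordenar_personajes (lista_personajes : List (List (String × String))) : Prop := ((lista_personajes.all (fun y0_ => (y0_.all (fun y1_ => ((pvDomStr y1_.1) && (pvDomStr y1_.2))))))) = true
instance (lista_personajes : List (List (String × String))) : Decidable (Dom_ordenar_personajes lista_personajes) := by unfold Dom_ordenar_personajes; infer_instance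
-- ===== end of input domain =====

-- B projects to (nombre, raza) pairs, sorts once by name and filters twice,
-- instead of A's accumulator loop into two lists followed by two per-list sorts.


-- first-match association-list lookup; "" is never read inside Pre_ (both keys present)
def pvGetS (p : List (String × String)) (k : String) : String :=
  (List.lookup k p).getD ""

-- ===== PORT A =====
def ordenar_personajes (lista_personajes : List (List (String × String))) : List String × List String :=
  let acc := lista_personajes.foldl
    (fun (acc : List String × List String) personaje =>
      if pvGetS personaje "raza" == "humano" then (acc.1 ++ [pvGetS personaje "nombre"], acc.2)
      else (acc.1, acc.2 ++ [pvGetS personaje "nombre"]))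
    ([], [])
  (PySem.List.sorted acc.1 (fun x => x) false, PySem.List.sorted acc.2 (fun x => x) false)

-- ===== PORT B =====
def ordenar_personajes_alt (lista_personajes : List (List (String × String))) : List String × List String :=
  let pares := PySem.List.sorted
    (lista_personajes.map (fun p => (pvGetS p "nombre", pvGetS p "raza")))
    (fun t => t.1) false
  let humanos := (pares.filter (fun t => t.2 == "humano")).map (fun t => t.1)
  let no_humanos := (pares.filter (fun t => t.2 != "humano")).map (fun t => t.1)
  (humanos, no_humanos)

-- ===== PRECONDITION & SPEC =====
-- Pre_ excludes inputs where some dict lacks the key "raza" or "nombre": there Python A raises KeyError.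
def Pre_ordenar_personajes (lista_personajes : List (List (String × String))) : Prop :=
  (lista_personajes.all (fun p => (List.lookup "raza" p).isSome && (List.lookup "nombre" p).isSome)) = true
instance (lista_personajes : List (List (String × String))) : Decidable (Pre_ordenar_personajes lista_personajes) := by unfold Pre_ordenar_personajes; infer_instance
def pvWitness_ordenar_personajes : (List (List (String × String))) :=
  [[("raza", "humano"), ("nombre", "Ana")], [("raza", "elfo"), ("nombre", "Bo")]]

def Spec_ordenar_personajes (lista_personajes : List (List (String × String))) (out : List String × List String) : Prop := out = ordenar_personajes_alt lista_personajes
instance (lista_personajes : List (List (String × String))) (out : List String × List String) : Decidable (Spec_ordenar_personajes lista_personajes out) := by unfold Spec_ordenar_personajes; infer_instance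

-- ===== CLAIM =====
def Claim_equal_ordenar_personajes : Prop := ∀ (lista_personajes : List (List (String × String))), Dom_ordenar_personajes lista_personajes → Pre_ordenar_personajes lista_personajes → Spec_ordenar_personajes lista_personajes (ordenar_personajes lista_personajes)

-- ===== LEMMAS AND PROOFS =====

-- A's loop computes the two filtered name lists.
theorem pv_fold_gen (l : List (List (String × String))) (a b : List String) :
    l.foldl
      (fun (acc : List String × List String) personaje =>
        if pvGetS personaje "raza" == "humano" then (acc.1 ++ [pvGetS personaje "nombre"], acc.2)
        else (acc.1, acc.2 ++ [pvGetS personaje "nombre"])) (a, b) =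
    (a ++ (l.filter (fun p => pvGetS p "raza" == "humano")).map (fun p => pvGetS p "nombre"),
     b ++ (l.filter (fun p => !(pvGetS p "raza" == "humano"))).map (fun p => pvGetS p "nombre")) := by
  induction l generalizing a b with
  | nil => simp
  | cons p t ih =>
    rw [List.foldl_cons]
    by_cases h : pvGetS p "raza" == "humano"
    · rw [if_pos h, ih]; simp [h]
    · rw [if_neg h, ih]; simp [h]

-- sorting the names of a race-filtered sublist = name-sorting the pair list, filtering on raza, taking names
theorem pv_sorted_filter_pairs (l : List (List (String × String))) (q : String → Bool) :
    PySem.List.sorted ((l.filter (fun p => q (pvGetS p "raza"))).map (fun p => pvGetS p "nombre")) (fun x => x) false =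
    ((PySem.List.sorted (l.map (fun p => (pvGetS p "nombre", pvGetS p "raza"))) (fun t => t.1) false).filter
      (fun t => q t.2)).map (fun t => t.1) := by
  apply PySem.List.sorted_id_eq_of_perm_of_pairwise
  case hp =>
    have hp : (PySem.List.sorted (l.map (fun p => (pvGetS p "nombre", pvGetS p "raza"))) (fun t => t.1) false).Perm
        (l.map (fun p => (pvGetS p "nombre", pvGetS p "raza"))) :=
      PySem.List.sorted_perm _ _ false
    have hp2 := (hp.filter (fun t : String × String => q t.2)).map (fun t : String × String => t.1)
    refine hp2.trans ?_
    rw [List.filter_map, List.map_map]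
    simp only [Function.comp_def]
    exact List.Perm.refl _
  case hs =>
    exact List.pairwise_map.mpr ((PySem.List.sorted_pairwise _ _).filter _)

-- ===== VERDICT =====
theorem ordenar_personajes_spec : Claim_equal_ordenar_personajes := by
  intro l _ _
  show ordenar_personajes l = ordenar_personajes_alt l
  unfold ordenar_personajes ordenar_personajes_alt
  rw [pv_fold_gen]
  simp only [List.nil_append]
  refine Prod.ext ?_ ?_
  · simpa using pv_sorted_filter_pairs l (fun r => r == "humano")
  · have h := pv_sorted_filter_pairs l (fun r => !(r == "humano"))
    simpa [bne] using h
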